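-- pv_equiv track=rewrite | github.com/levani-b/leetcode-solutions | LC-3697-ComputeDecimalRepresentation.py | decimalRepresentation
-- ===== SOURCE A (Python) =====
-- from typing import List
--
-- def decimalRepresentation(n: int) -> List[int]:
--     res = []
--     exponent = 0
--
--     while n > 0:
--         remain = n % 10
--         n //= 10
--         if remain == 0:
--             pass
--         else:
--             res.append(remain * 10**exponent)
--         exponent += 1
--
--     return res[::-1]
-- ===== SOURCE B (Python) =====
-- from typing import List
--
-- def decimalRepresentation(n: int) -> List[int]:
--     # recursive decomposition: scale the representation of n // 10 by 10,
--     # then append the last digit; no exponent counter and no final reverse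
--     if n <= 0:
--         return []
--     rest = [x * 10 for x in decimalRepresentation(n // 10)]
--     d = n % 10
--     return rest + ([d] if d != 0 else [])
-- ===== Notes on version B (the rewrite author's own statement) =====
-- stated objective: alternative
-- what changed: Replaces A's while-loop with exponent accumulator, low-to-high appends and a final reverse by a structural recursion on the quotient-by-ten that builds the list high-to-low directly, scaling the recursive result by ten instead of tracking a place-value exponent.
import Mathlib
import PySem

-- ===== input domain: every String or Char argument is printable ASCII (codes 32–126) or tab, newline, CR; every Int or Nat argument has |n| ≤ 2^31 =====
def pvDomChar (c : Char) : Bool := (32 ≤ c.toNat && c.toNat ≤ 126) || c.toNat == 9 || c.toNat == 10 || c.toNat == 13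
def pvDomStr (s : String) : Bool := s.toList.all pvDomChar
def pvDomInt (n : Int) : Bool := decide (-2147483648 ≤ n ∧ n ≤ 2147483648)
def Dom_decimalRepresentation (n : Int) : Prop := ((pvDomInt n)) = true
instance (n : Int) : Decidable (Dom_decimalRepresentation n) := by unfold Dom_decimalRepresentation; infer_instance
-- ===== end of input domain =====

-- B replaces the while-loop + exponent + final reverse by a structural recursion on n // 10
-- that scales the recursive result by 10 (objective: alternative decomposition, same cost class).


-- ===== PORT A =====
-- the while loop: state (n, exponent, res); res[::-1] at the end
def decimalRepresentationLoop (n : Int) (exponent : Nat) (res : List Int) : List Int :=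
  if h : n > 0 then
    let remain := PySem.Int.mod n 10
    let n' := PySem.Int.floordiv n 10
    let res' := if remain == 0 then res else res ++ [remain * 10 ^ exponent]
    decimalRepresentationLoop n' (exponent + 1) res'
  else res
termination_by n.toNat
decreasing_by
  have h1 : PySem.Int.floordiv n 10 = n / 10 := PySem.Int.floordiv_eq_ediv_of_pos (by omega)
  have h2 : n / 10 < n := by omega
  have h3 : 0 ≤ n / 10 := by omega
  omega

def decimalRepresentation (n : Int) : List Int :=
  (decimalRepresentationLoop n 0 []).reverse

-- ===== PORT B =====
def decimalRepresentation_alt (n : Int) : List Int :=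
  if h : n ≤ 0 then []
  else
    let rest := (decimalRepresentation_alt (PySem.Int.floordiv n 10)).map (· * 10)
    let d := PySem.Int.mod n 10
    rest ++ (if d ≠ 0 then [d] else [])
termination_by n.toNat
decreasing_by
  have h1 : PySem.Int.floordiv n 10 = n / 10 := PySem.Int.floordiv_eq_ediv_of_pos (by omega)
  have h2 : n / 10 < n := by omega
  have h3 : 0 ≤ n / 10 := by omega
  omega

-- ===== PRECONDITION & SPEC =====
def Spec_decimalRepresentation (n : Int) (out : List Int) : Prop := out = decimalRepresentation_alt n
instance (n : Int) (out : List Int) : Decidable (Spec_decimalRepresentation n out) := by unfold Spec_decimalRepresentation; infer_instance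

-- ===== CLAIM (what is proved, stated in full; the proofs are below) =====
def Claim_equal_decimalRepresentation : Prop := ∀ (n : Int), Dom_decimalRepresentation n → Spec_decimalRepresentation n (decimalRepresentation n)

-- ===== LEMMAS AND PROOFS =====

-- the loop only appends to res
theorem loop_append (n : Int) (e : Nat) (res : List Int) :
    decimalRepresentationLoop n e res = res ++ decimalRepresentationLoop n e [] := by
  conv_lhs => rw [decimalRepresentationLoop]
  conv_rhs => rw [decimalRepresentationLoop]
  by_cases h : n > 0
  · simp only [h, dite_true]
    by_cases hr : PySem.Int.mod n 10 = 0
    · have hb : (PySem.Int.mod n 10 == 0) = true := by simpa using hr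
      simp only [hb, if_true]
      exact loop_append _ _ _
    · have hb : (PySem.Int.mod n 10 == 0) = false := by simpa using hr
      simp only [hb, Bool.false_eq_true, if_false, List.nil_append]
      rw [loop_append (PySem.Int.floordiv n 10) (e + 1)
            (res ++ [PySem.Int.mod n 10 * 10 ^ e])]
      conv_rhs => rw [loop_append (PySem.Int.floordiv n 10) (e + 1)
            ([PySem.Int.mod n 10 * 10 ^ e])]
      simp
  · simp [h]
termination_by n.toNat
decreasing_by
  all_goals
    have h1 : PySem.Int.floordiv n 10 = n / 10 := PySem.Int.floordiv_eq_ediv_of_pos (by omega)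
    omega

-- reversing the loop's output equals B's result scaled by 10^e
theorem loop_reverse_eq (n : Int) (e : Nat) :
    (decimalRepresentationLoop n e []).reverse
      = (decimalRepresentation_alt n).map (· * 10 ^ e) := by
  by_cases h : n > 0
  · rw [decimalRepresentationLoop, decimalRepresentation_alt]
    have hn : ¬ n ≤ 0 := by omega
    simp only [h, dite_true, hn, dite_false]
    rw [loop_append]
    have ih := loop_reverse_eq (PySem.Int.floordiv n 10) (e + 1)
    by_cases hr : PySem.Int.mod n 10 = 0
    · have hb : (PySem.Int.mod n 10 == 0) = true := by simpa using hr
      simp only [hr, ne_eq, not_true_eq_false, if_false]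
      simp only [List.append_nil, List.reverse_append]
      rw [ih]
      simp [List.map_map, pow_succ, mul_comm]
    · have hb : (PySem.Int.mod n 10 == 0) = false := by simpa using hr
      simp only [hb, Bool.false_eq_true, if_false, ne_eq, hr, not_false_eq_true, if_true]
      simp only [List.reverse_append, List.map_append]
      rw [ih]
      simp [List.map_map, pow_succ, mul_comm]
  · rw [decimalRepresentationLoop, decimalRepresentation_alt]
    have hn : n ≤ 0 := by omega
    simp [h, hn]
termination_by n.toNat
decreasing_by
  all_goals
    have h1 : PySem.Int.floordiv n 10 = n / 10 := PySem.Int.floordiv_eq_ediv_of_pos (by omega)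
    omega

-- ===== VERDICT (by name: the statement is the Claim_ definition above) =====
theorem decimalRepresentation_spec : Claim_equal_decimalRepresentation := by
  intro n _
  unfold Spec_decimalRepresentation decimalRepresentation
  rw [loop_reverse_eq n 0]
  simp
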